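-- pv_equiv track=rewrite | github.com/dzavalishin/mqtt_udp | lang/python3/mqttudp/engine.py | pack_remaining_length
-- ===== SOURCE A (Python) =====
-- def pack_remaining_length(packet, remain_length):
--         remain_bytes = []
--         while True:
--             byte = remain_length % 128
--             remain_length = remain_length // 128
--             # If there are more digits to encode, set the top bit of this digit
--             if remain_length > 0:
--                 byte |= 0x80
--
--             remain_bytes.append(byte)
--             packet.append(byte)
--             if remain_length == 0:
--                 # FIXME - this doesn't deal with incorrectly large payloads
--                 return packet
-- ===== SOURCE B (Python) =====
-- def pack_remaining_length(packet, remain_length):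
--     # Closed-form byte count first: smallest k >= 1 with remain_length < 128**k.
--     k = 1
--     while remain_length // (128 ** k):
--         k += 1
--     # Then extract each base-128 digit positionally (no running remainder state);
--     # continuation bit on every byte except the last.
--     for i in range(k):
--         d = (remain_length // 128 ** i) % 128
--         packet.append(d if i == k - 1 else d | 0x80)
--     return packet
-- ===== Notes on version B (the rewrite author's own statement) =====
-- stated objective: alternative
-- what changed: B first computes the encoded byte count k in closed form (smallest k with n < 128**k), then extracts each base-128 digit positionally as (n // 128**i) % 128 over range(k), marking the continuation bit by index position - no running remainder state, no do-while, no remain_bytes list.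
import Mathlib
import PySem

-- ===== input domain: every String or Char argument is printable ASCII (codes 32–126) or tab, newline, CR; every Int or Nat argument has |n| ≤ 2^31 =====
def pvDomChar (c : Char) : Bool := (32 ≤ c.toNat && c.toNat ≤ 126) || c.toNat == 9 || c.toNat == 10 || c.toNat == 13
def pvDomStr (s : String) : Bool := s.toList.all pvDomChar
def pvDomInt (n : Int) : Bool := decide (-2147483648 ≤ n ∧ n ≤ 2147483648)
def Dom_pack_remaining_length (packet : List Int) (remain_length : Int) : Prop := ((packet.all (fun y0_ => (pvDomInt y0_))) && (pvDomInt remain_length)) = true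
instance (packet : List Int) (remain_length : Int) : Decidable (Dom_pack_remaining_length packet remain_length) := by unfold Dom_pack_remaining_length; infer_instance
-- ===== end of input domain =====

-- B computes the byte count k in closed form and then extracts each base-128 digit positionally,
-- instead of A's do-while over a running remainder; equivalence is about the RETURN value
-- (the Python A and B both also append the same bytes to `packet` in place).

-- ===== PORT A =====
-- A's while-True loop, with a fuel guard for totality only (fuel = remain_length.toNat + 1 always
-- suffices on Pre_, since remain_length strictly decreases each iteration while positive).
def pack_rl_loop (fuel : Nat) (packet : List Int) (remain_length : Int) : List Int :=
  match fuel with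
  | 0 => packet
  | fuel + 1 =>
    let byte := PySem.Int.mod remain_length 128
    let rl := PySem.Int.floordiv remain_length 128
    let byte := if rl > 0 then PySem.Int.bor byte 0x80 else byte
    let packet := packet ++ [byte]
    if rl = 0 then packet else pack_rl_loop fuel packet rl

def pack_remaining_length (packet : List Int) (remain_length : Int) : List Int :=
  pack_rl_loop (remain_length.toNat + 1) packet remain_length

-- ===== PORT B =====
-- `k = 1; while remain_length // (128 ** k): k += 1` — fuel guard for totality only
-- (fuel = remain_length.toNat + 1 always suffices on Pre_, since k can only grow to log_128).
def pack_rl_count (fuel : Nat) (n : Int) (k : Nat) : Nat :=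
  match fuel with
  | 0 => k
  | fuel + 1 =>
    if PySem.Int.floordiv n ((128:Int) ^ k) ≠ 0 then pack_rl_count fuel n (k + 1) else k

-- `for i in range(k): d = (remain_length // 128 ** i) % 128; packet.append(d if i == k-1 else d | 0x80)`
-- (the exponent `128 ** i` is taken at i.toNat — exact, since every i produced by range(k) is ≥ 0).
def pack_remaining_length_alt (packet : List Int) (remain_length : Int) : List Int :=
  let k := pack_rl_count (remain_length.toNat + 1) remain_length 1
  packet ++ (PySem.List.pyRange 0 (k : Int) 1).map (fun i =>
    let d := PySem.Int.mod (PySem.Int.floordiv remain_length ((128:Int) ^ i.toNat)) 128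
    if i = (k : Int) - 1 then d else PySem.Int.bor d 128)

-- ===== PRECONDITION & SPEC =====
-- A's while-loop never terminates for negative remain_length (remain_length // 128 stays at -1),
-- so Pre_ admits exactly the inputs on which the Python A returns.
def Pre_pack_remaining_length (packet : List Int) (remain_length : Int) : Prop :=
  0 ≤ remain_length
instance (packet : List Int) (remain_length : Int) : Decidable (Pre_pack_remaining_length packet remain_length) := by
  unfold Pre_pack_remaining_length; infer_instance

def pvWitness_pack_remaining_length : List Int × Int := ([16, 2], 321)

def Spec_pack_remaining_length (packet : List Int) (remain_length : Int) (out : List Int) : Prop := out = pack_remaining_length_alt packet remain_length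
instance (packet : List Int) (remain_length : Int) (out : List Int) : Decidable (Spec_pack_remaining_length packet remain_length out) := by unfold Spec_pack_remaining_length; infer_instance

-- ===== CLAIM (what is proved, stated in full; the proofs are below) =====
def Claim_equal_pack_remaining_length : Prop := ∀ (packet : List Int) (remain_length : Int), Dom_pack_remaining_length packet remain_length → Pre_pack_remaining_length packet remain_length → Spec_pack_remaining_length packet remain_length (pack_remaining_length packet remain_length)

-- ===== LEMMAS AND PROOFS =====

-- The common characterisation of the emitted byte list.
def encBytes (n : Int) : List Int :=
  if h : 128 ≤ n then
    PySem.Int.bor (PySem.Int.mod n 128) 128 :: encBytes (PySem.Int.floordiv n 128)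
  else [PySem.Int.mod n 128]
termination_by n.toNat
decreasing_by
  rw [PySem.Int.floordiv_eq_ediv_of_pos (by omega : (0:Int) < 128)]
  omega

lemma floordiv128_bounds (n : Int) (h : 0 ≤ n) :
    (128 ≤ n → 1 ≤ PySem.Int.floordiv n 128 ∧ (PySem.Int.floordiv n 128).toNat < n.toNat) ∧
    (n < 128 → PySem.Int.floordiv n 128 = 0) := by
  rw [PySem.Int.floordiv_eq_ediv_of_pos (by omega : (0:Int) < 128)]
  omega

lemma pack_rl_loop_eq (fuel : Nat) :
    ∀ (n : Int) (packet : List Int), 0 ≤ n → n.toNat < fuel →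
      pack_rl_loop fuel packet n = packet ++ encBytes n := by
  induction fuel with
  | zero => intro n packet _ h; omega
  | succ fuel ih =>
    intro n packet hn hfuel
    have hb := floordiv128_bounds n hn
    by_cases h128 : 128 ≤ n
    · have h1 := hb.1 h128
      rw [pack_rl_loop]
      simp only [if_pos (by omega : PySem.Int.floordiv n 128 > 0),
                 if_neg (by omega : ¬ PySem.Int.floordiv n 128 = 0)]
      rw [ih (PySem.Int.floordiv n 128) _ (by omega) (by omega)]
      conv_rhs => rw [encBytes, dif_pos h128]
      simp
    · have h0 := hb.2 (by omega)
      rw [pack_rl_loop, encBytes, dif_neg h128]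
      simp only [h0]
      simp

-- nested floor divisions collapse (nonnegative dividend not even needed; positive divisors)
lemma floordiv_floordiv (n b c : Int) (hb : 0 < b) (hc : 0 < c) :
    PySem.Int.floordiv (PySem.Int.floordiv n b) c = PySem.Int.floordiv n (b * c) := by
  rw [PySem.Int.floordiv_eq_ediv_of_pos hb, PySem.Int.floordiv_eq_ediv_of_pos hc,
      PySem.Int.floordiv_eq_ediv_of_pos (by positivity)]
  exact Int.ediv_ediv_of_nonneg (by omega)

-- the closed-form byte count, as a structural recursion
def Kspec (n : Int) : Nat :=
  if h : 128 ≤ n then Kspec (PySem.Int.floordiv n 128) + 1 else 1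
termination_by n.toNat
decreasing_by
  rw [PySem.Int.floordiv_eq_ediv_of_pos (by omega : (0:Int) < 128)]
  omega

lemma Kspec_pos (n : Int) : 1 ≤ Kspec n := by
  rw [Kspec]; split <;> omega

-- shifting the counter loop down one digit
lemma pack_rl_count_shift (fuel : Nat) :
    ∀ (n : Int) (k : Nat), pack_rl_count fuel n (k + 1) =
      pack_rl_count fuel (PySem.Int.floordiv n 128) k + 1 := by
  induction fuel with
  | zero => intro n k; rfl
  | succ fuel ih =>
    intro n k
    have hcol : PySem.Int.floordiv n ((128:Int) ^ (k + 1)) =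
        PySem.Int.floordiv (PySem.Int.floordiv n 128) ((128:Int) ^ k) := by
      rw [floordiv_floordiv n 128 ((128:Int)^k) (by omega) (by positivity), pow_succ']
    rw [pack_rl_count, pack_rl_count, hcol]
    split
    · rw [ih]
    · rfl

lemma pack_rl_count_eq (n : Int) (hn : 0 ≤ n) :
    ∀ (fuel : Nat), n.toNat < fuel → pack_rl_count fuel n 1 = Kspec n := by
  induction n using Kspec.induct with
  | case1 n h ih =>
    intro fuel hfuel
    have hb := (floordiv128_bounds n hn).1 h
    match fuel, hfuel with
    | fuel + 1, _ =>
      rw [pack_rl_count]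
      simp only [pow_one]
      rw [if_pos (by omega), pack_rl_count_shift,
          ih (by omega) fuel (by omega)]
      conv_rhs => rw [Kspec]
      rw [dif_pos h]
  | case2 n h =>
    intro fuel hfuel
    have h0 := (floordiv128_bounds n hn).2 (by omega)
    match fuel, hfuel with
    | fuel + 1, _ =>
      rw [pack_rl_count]
      simp only [pow_one]
      rw [if_neg (by omega)]
      conv_rhs => rw [Kspec]
      rw [dif_neg h]

-- positional extraction over range(Kspec n) produces exactly the encoded bytes
lemma digits_eq (n : Int) : 0 ≤ n →
    (PySem.List.pyRange 0 ((Kspec n : Nat) : Int) 1).map (fun i =>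
      let d := PySem.Int.mod (PySem.Int.floordiv n ((128:Int) ^ i.toNat)) 128
      if i = ((Kspec n : Nat) : Int) - 1 then d else PySem.Int.bor d 128) = encBytes n := by
  induction n using encBytes.induct with
  | case1 n h ih =>
    intro hn
    have hK' := Kspec_pos (PySem.Int.floordiv n 128)
    have hKn : Kspec n = Kspec (PySem.Int.floordiv n 128) + 1 := by
      rw [Kspec, dif_pos h]
    set K := Kspec (PySem.Int.floordiv n 128) with hKdef
    rw [hKn]
    rw [PySem.List.pyRange_one_cons (by push_cast; omega : (0:Int) < ((K + 1 : Nat) : Int))]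
    simp only [zero_add]
    rw [encBytes, dif_pos h, List.map_cons]
    have hdiv1 : PySem.Int.floordiv n ((128:Int) ^ (0:Int).toNat) = n := by
      rw [PySem.Int.floordiv_eq_ediv_of_pos (by norm_num : (0:Int) < (128:Int) ^ (0:Int).toNat)]
      norm_num
    congr 1
    · rw [if_neg (by push_cast; omega), hdiv1]
    have htail : PySem.List.pyRange 1 ((K + 1 : Nat) : Int) 1 =
        (PySem.List.pyRange 0 ((K : Nat) : Int) 1).map (fun j => 1 + j) := by
      rw [PySem.List.pyRange_one, PySem.List.pyRange_one]
      have : (((K + 1 : Nat) : Int) - 1).toNat = (((K : Nat) : Int) - 0).toNat := by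
        push_cast; omega
      rw [this, List.map_map]
      simp [Function.comp]
    rw [htail, List.map_map]
    rw [← ih (by
      have := (floordiv128_bounds n hn).1 h
      omega)]
    apply List.map_congr_left
    intro j hj
    have hj0 : 0 ≤ j ∧ j < ((K : Nat) : Int) := by
      have := (PySem.List.mem_pyRange_one).1 hj
      exact this
    have htoNat : (1 + j).toNat = j.toNat + 1 := by omega
    have hdig : PySem.Int.floordiv n ((128:Int) ^ (1 + j).toNat) =
        PySem.Int.floordiv (PySem.Int.floordiv n 128) ((128:Int) ^ j.toNat) := by
      rw [htoNat, pow_succ', ← floordiv_floordiv n 128 ((128:Int)^j.toNat) (by omega) (by positivity)]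
    have hcond : (1 + j = ((K + 1 : Nat) : Int) - 1) ↔ (j = ((K : Nat) : Int) - 1) := by
      push_cast; omega
    simp only [Function.comp_apply, hdig]
    by_cases hc : j = ((K : Nat) : Int) - 1
    · rw [if_pos (hcond.2 hc), if_pos hc]
    · rw [if_neg (fun hx => hc (hcond.1 hx)), if_neg hc]
  | case2 n h =>
    intro hn
    have hK : Kspec n = 1 := by rw [Kspec, dif_neg h]
    rw [hK, encBytes, dif_neg h]
    have h01 : PySem.List.pyRange 0 ((1:Nat):Int) 1 = [0] := by decide
    have hdiv1 : PySem.Int.floordiv n ((128:Int) ^ (0:Int).toNat) = n := by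
      rw [PySem.Int.floordiv_eq_ediv_of_pos (by norm_num : (0:Int) < (128:Int) ^ (0:Int).toNat)]
      norm_num
    rw [h01, List.map_cons, List.map_nil]
    rw [if_pos (by decide : (0:Int) = ((1:Nat):Int) - 1), hdiv1]

-- ===== VERDICT (by name: the statement is the Claim_ definition above) =====
theorem pack_remaining_length_spec : Claim_equal_pack_remaining_length := by
  intro packet n _ hpre
  unfold Spec_pack_remaining_length pack_remaining_length pack_remaining_length_alt
  rw [pack_rl_loop_eq (n.toNat + 1) n packet hpre (by omega)]
  simp only [pack_rl_count_eq n hpre (n.toNat + 1) (by omega), digits_eq n hpre]
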